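-- pv_equiv track=rewrite | github.com/YigalOrn/Afeka | Course Programming Languages/Python workPlace/תרגילי הגשה 2016/1/Ex_1/Ex_1.py | decrypt3
-- ===== SOURCE A (Python) =====
-- def decrypt3(myStr):
--     lstMystr = list(myStr)
--     i = 0
--     while i<len(lstMystr):
--         if lstMystr[i] not in ["a","e","i","o","u"] and lstMystr[i] != ' ':
--             del lstMystr[i]
--             i+=1
--         else:
--             i+=1
--     return lstMystr
-- ===== SOURCE B (Python) =====
-- def decrypt3(myStr):
--     # Single forward pass: a deleted consonant makes the next char kept unconditionally.
--     out = []
--     keep_next = False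
--     for ch in myStr:
--         if keep_next:
--             out.append(ch)
--             keep_next = False
--         elif ch in "aeiou" or ch == ' ':
--             out.append(ch)
--         else:
--             keep_next = True
--     return out
-- ===== Notes on version B (the rewrite author's own statement) =====
-- stated objective: faster
-- what changed: Replaced the index-driven while loop with in-place list deletion (each del shifts the tail, O(n^2)) by a single forward pass with a keep_next flag that reproduces the delete-then-skip behaviour while appending to an output list, O(n).
import Mathlib
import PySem

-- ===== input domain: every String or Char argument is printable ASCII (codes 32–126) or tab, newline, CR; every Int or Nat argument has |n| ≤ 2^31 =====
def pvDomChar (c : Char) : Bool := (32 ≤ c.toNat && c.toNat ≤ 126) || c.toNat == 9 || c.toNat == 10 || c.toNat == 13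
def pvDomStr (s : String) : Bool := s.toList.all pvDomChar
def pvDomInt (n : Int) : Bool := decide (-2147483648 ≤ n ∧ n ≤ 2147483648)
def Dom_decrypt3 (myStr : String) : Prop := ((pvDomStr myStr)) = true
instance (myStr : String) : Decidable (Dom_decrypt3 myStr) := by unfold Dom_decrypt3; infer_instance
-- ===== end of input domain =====

-- B replaces A's while loop with in-place deletion (quadratic) by one forward pass with a skip flag (linear).

-- ===== PORT A =====
-- while i < len(lst): if lst[i] not in vowels and lst[i] != ' ': del lst[i]; i+=1 else: i+=1
def decrypt3Loop (lst : List Char) (i : Nat) : List Char :=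
  if h : i < lst.length then
    if lst[i] ∉ (['a','e','i','o','u'] : List Char) ∧ lst[i] ≠ ' ' then
      decrypt3Loop (lst.eraseIdx i) (i + 1)
    else
      decrypt3Loop lst (i + 1)
  else
    lst
termination_by lst.length - i
decreasing_by
  · simp [List.length_eraseIdx, h]; omega
  · omega

def decrypt3 (myStr : String) : List String :=
  (decrypt3Loop myStr.toList 0).map (fun c => String.ofList [c])

-- ===== PORT B =====
-- single pass: keepNext forces the next char to be kept (the char after a deleted consonant)
def decrypt3AltLoop (lst : List Char) (keepNext : Bool) : List Char :=
  match lst, keepNext with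
  | [], _ => []
  | c :: rest, true => c :: decrypt3AltLoop rest false
  | c :: rest, false =>
    if c ∈ (['a','e','i','o','u'] : List Char) ∨ c = ' ' then
      c :: decrypt3AltLoop rest false
    else
      decrypt3AltLoop rest true

def decrypt3_alt (myStr : String) : List String :=
  (decrypt3AltLoop myStr.toList false).map (fun c => String.ofList [c])

-- ===== PRECONDITION & SPEC =====
def Spec_decrypt3 (myStr : String) (out : List String) : Prop := out = decrypt3_alt myStr
instance (myStr : String) (out : List String) : Decidable (Spec_decrypt3 myStr out) := by unfold Spec_decrypt3; infer_instance

-- ===== CLAIM (what is proved, stated in full; the proofs are below) =====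
def Claim_equal_decrypt3 : Prop := ∀ (myStr : String), Dom_decrypt3 myStr → Spec_decrypt3 myStr (decrypt3 myStr)

-- ===== LEMMAS AND PROOFS =====

theorem eraseIdx_append_cons (pre : List Char) (c : Char) (rest : List Char) :
    (pre ++ c :: rest).eraseIdx pre.length = pre ++ rest := by
  induction pre with
  | nil => simp [List.eraseIdx]
  | cons p ps ih => simp [List.eraseIdx, ih]

theorem getElem_append_len (pre : List Char) (c : Char) (rest : List Char)
    (h : pre.length < (pre ++ c :: rest).length) :
    (pre ++ c :: rest)[pre.length] = c := by
  simp

theorem decrypt3Loop_key (suf pre : List Char) :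
    decrypt3Loop (pre ++ suf) pre.length = pre ++ decrypt3AltLoop suf false := by
  match suf with
  | [] =>
    rw [decrypt3Loop]
    simp [decrypt3AltLoop]
  | c :: rest =>
    rw [decrypt3Loop]
    have hlt : pre.length < (pre ++ c :: rest).length := by simp
    rw [dif_pos hlt]
    rw [getElem_append_len pre c rest hlt]
    by_cases hc : c ∈ (['a','e','i','o','u'] : List Char) ∨ c = ' '
    · -- kept: A moves on, B keeps it
      have : ¬ (c ∉ (['a','e','i','o','u'] : List Char) ∧ c ≠ ' ') := by tauto
      rw [if_neg this]
      have h1 : pre ++ c :: rest = (pre ++ [c]) ++ rest := by simp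
      have h2 : pre.length + 1 = (pre ++ [c]).length := by simp
      rw [h1, h2, decrypt3Loop_key rest (pre ++ [c])]
      simp only [decrypt3AltLoop]
      rw [if_pos hc]
      simp
    · -- consonant: A deletes it and skips the next char; B drops it and keeps next
      have hc' : c ∉ (['a','e','i','o','u'] : List Char) ∧ c ≠ ' ' := by tauto
      rw [if_pos hc', eraseIdx_append_cons]
      match rest with
      | [] =>
        rw [decrypt3Loop]
        simp only [decrypt3AltLoop]
        rw [if_neg hc]
        simp [decrypt3AltLoop]
      | d :: rest' =>
        have h1 : pre ++ d :: rest' = (pre ++ [d]) ++ rest' := by simp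
        have h2 : pre.length + 1 = (pre ++ [d]).length := by simp
        rw [h1, h2, decrypt3Loop_key rest' (pre ++ [d])]
        simp only [decrypt3AltLoop]
        rw [if_neg hc]
        simp [decrypt3AltLoop]
termination_by suf.length

-- ===== VERDICT (by name: the statement is the Claim_ definition above) =====
theorem decrypt3_spec : Claim_equal_decrypt3 := by
  intro myStr _
  unfold Spec_decrypt3 decrypt3 decrypt3_alt
  have := decrypt3Loop_key myStr.toList []
  simpa using congrArg (List.map (fun c => String.ofList [c])) this
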